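-- pv_equiv track=rewrite | github.com/dimoibiehg/DeathStarBenchIVsMeasurement | learning_experiment.py | make_a_monotonic_array
-- ===== SOURCE A (Python) =====
-- def make_a_monotonic_array(arr, err):
--     result = []
--     for i in range(len(arr)):
--         if(i == 0):
--             result.append(arr[i])
--         else:
--             if(arr[i] < result[-1]):
--                 result.append(result[-1])
--                 err[i] = err[i-1]
--             else:
--                 result.append(arr[i])
--     return result
-- ===== SOURCE B (Python) =====
-- def make_a_monotonic_array(arr, err):
--     # Pass 1: build the monotonic table as a prefix running-max scan.
--     result = []
--     m = None
--     for x in arr: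
--         m = x if m is None or x > m else m
--         result.append(m)
--     # Pass 2: separate correction pass over err (mutates err like the original).
--     for i in range(1, len(arr)):
--         if arr[i] < result[i - 1]:
--             err[i] = err[i - 1]
--     return result
-- ===== Notes on version B (the rewrite author's own statement) =====
-- stated objective: simpler
-- what changed: Replaces A's fused loop (which re-reads result[-1] and fixes err inline) with a prefix running-max scan carrying a scalar maximum to build the table, followed by a separate correction pass over err.
import Mathlib
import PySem

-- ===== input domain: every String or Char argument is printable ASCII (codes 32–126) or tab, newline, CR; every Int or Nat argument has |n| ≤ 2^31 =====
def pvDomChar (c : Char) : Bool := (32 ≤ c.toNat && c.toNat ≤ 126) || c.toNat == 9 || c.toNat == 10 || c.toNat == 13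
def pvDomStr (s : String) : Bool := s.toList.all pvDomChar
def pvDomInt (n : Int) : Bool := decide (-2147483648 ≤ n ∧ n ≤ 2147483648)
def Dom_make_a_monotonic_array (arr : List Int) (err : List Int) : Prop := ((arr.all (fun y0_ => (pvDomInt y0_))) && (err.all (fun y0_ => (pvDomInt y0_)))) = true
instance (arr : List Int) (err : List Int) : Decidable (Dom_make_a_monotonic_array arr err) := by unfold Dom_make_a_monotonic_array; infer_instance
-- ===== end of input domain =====

-- B replaces A's fused loop by a running-max table scan plus a separate err-correction
-- pass (objective: simpler decomposition). Both A and B mutate err in place; the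
-- equivalence proved here is about the RETURN value only (the mutation is identical in Python).

-- ===== PORT A =====
-- literal port of A's single loop over range(len(arr)), with result[-1] read via pyGetD;
-- the err[i] = err[i-1] assignment mutates err only and does not affect the return value,
-- and inside Pre_ it never raises, so it is not modelled.
def make_a_monotonic_array (arr : List Int) (err : List Int) : List Int :=
  (PySem.List.pyRange 0 arr.length 1).foldl (fun result i =>
    if i = 0 then
      result ++ [PySem.List.pyGetD arr i 0]
    else
      if PySem.List.pyGetD arr i 0 < PySem.List.pyGetD result (-1) 0 then
        result ++ [PySem.List.pyGetD result (-1) 0]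
      else
        result ++ [PySem.List.pyGetD arr i 0]) []

-- ===== PORT B =====
-- B's pass 1: running-max scan carrying the scalar m (m = None handled by splitting off the head).
def bScan (m : Int) : List Int → List Int
  | [] => []
  | y :: ys => (if y > m then y else m) :: bScan (if y > m then y else m) ys

-- B's pass 2 only mutates err (identically to A) and does not touch the returned table,
-- so the port returns pass 1's table directly.
def make_a_monotonic_array_alt (arr : List Int) (err : List Int) : List Int :=
  match arr with
  | [] => []
  | x :: xs => x :: bScan x xs

-- ===== PRECONDITION & SPEC =====
-- Pre_ excludes exactly the inputs where A raises IndexError: some position i ≥ err.length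
-- gets clamped (arr[i] below the prefix maximum) so err[i] = err[i-1] is out of range.
-- (B raises the same IndexError there, so nothing returned by A is excluded.)
def Pre_make_a_monotonic_array (arr : List Int) (err : List Int) : Prop :=
  ∀ i : Nat, i < arr.length → 0 < i → err.length ≤ i →
    ¬ (arr.getD i 0 < (arr.take i).foldl max (arr.headD 0))
instance (arr : List Int) (err : List Int) : Decidable (Pre_make_a_monotonic_array arr err) := by
  unfold Pre_make_a_monotonic_array; infer_instance

def pvWitness_make_a_monotonic_array : List Int × List Int := ([1, 0, 2], [5, 5, 5])

def Spec_make_a_monotonic_array (arr : List Int) (err : List Int) (out : List Int) : Prop := out = make_a_monotonic_array_alt arr err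
instance (arr : List Int) (err : List Int) (out : List Int) : Decidable (Spec_make_a_monotonic_array arr err out) := by unfold Spec_make_a_monotonic_array; infer_instance

-- ===== CLAIM (what is proved, stated in full; the proofs are below) =====
def Claim_equal_make_a_monotonic_array : Prop := ∀ (arr : List Int) (err : List Int), Dom_make_a_monotonic_array arr err → Pre_make_a_monotonic_array arr err → Spec_make_a_monotonic_array arr err (make_a_monotonic_array arr err)

-- ===== LEMMAS AND PROOFS =====

-- A's loop over the indices k..n-1 (k ≥ 1), started with a non-empty result whose last
-- element is m, appends exactly B's running-max scan of arr.drop k.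
theorem aLoop_eq_bScan (arr : List Int) :
    ∀ (ys : List Int) (k : Nat), arr.drop k = ys → 1 ≤ k →
    ∀ (res : List Int) (m : Int), PySem.List.pyGetD res (-1) 0 = m →
    (PySem.List.pyRange (k : Int) (arr.length : Int) 1).foldl (fun result i =>
      if i = 0 then
        result ++ [PySem.List.pyGetD arr i 0]
      else
        if PySem.List.pyGetD arr i 0 < PySem.List.pyGetD result (-1) 0 then
          result ++ [PySem.List.pyGetD result (-1) 0]
        else
          result ++ [PySem.List.pyGetD arr i 0]) res = res ++ bScan m ys := by
  intro ys
  induction ys with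
  | nil =>
    intro k hdrop _ res m _
    have hlen : arr.length ≤ k := by
      by_contra h
      have := List.drop_eq_nil_iff.mp hdrop
      omega
    rw [PySem.List.pyRange_one_eq_nil (by exact_mod_cast hlen)]
    simp [bScan]
  | cons y ys ih =>
    intro k hdrop hk res m hm
    have hklt : k < arr.length := by
      by_contra h
      have : arr.drop k = [] := List.drop_eq_nil_iff.mpr (by omega)
      simp [this] at hdrop
    have hd : arr.drop k = arr[k] :: arr.drop (k + 1) :=
      List.drop_eq_getElem_cons hklt
    rw [hdrop] at hd
    have hy : y = arr[k] := (List.cons.injEq _ _ _ _).mp hd |>.1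
    have hys : arr.drop (k + 1) = ys := ((List.cons.injEq _ _ _ _).mp hd |>.2).symm
    rw [PySem.List.pyRange_one_cons (by exact_mod_cast hklt)]
    simp only [List.foldl_cons]
    have hk0 : ¬ ((k : Int) = 0) := by exact_mod_cast (by omega : ¬ (k = 0))
    have hget : PySem.List.pyGetD arr (k : Int) 0 = y := by
      rw [PySem.List.pyGetD_natCast, List.getD_eq_getElem _ _ hklt, hy]
    rw [if_neg hk0, hget, hm]
    have hstep : (if y < m then res ++ [m] else res ++ [y])
        = res ++ [if y > m then y else m] := by
      split_ifs with h1 h2 h3 <;> simp_all <;> omega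
    rw [hstep]
    have := ih (k + 1) hys (by omega) (res ++ [if y > m then y else m])
      (if y > m then y else m)
      (PySem.List.pyGetD_neg_one_append_singleton res _ 0)
    rw [show ((k : Int) + 1) = ((k + 1 : Nat) : Int) by push_cast; ring, this,
      bScan, List.append_assoc]
    rfl

-- ===== VERDICT (by name: the statement is the Claim_ definition above) =====
theorem make_a_monotonic_array_spec : Claim_equal_make_a_monotonic_array := by
  intro arr err _ _
  unfold Spec_make_a_monotonic_array
  cases arr with
  | nil =>
    simp [make_a_monotonic_array, make_a_monotonic_array_alt,
      PySem.List.pyRange_one_eq_nil (le_refl (0 : Int))]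
  | cons a rest =>
    unfold make_a_monotonic_array make_a_monotonic_array_alt
    have hlen : (0 : Int) < ((a :: rest).length : Int) := by
      simp
    rw [PySem.List.pyRange_one_cons hlen]
    simp only [List.foldl_cons]
    have h0 : PySem.List.pyGetD (a :: rest) (0 : Int) 0 = a :=
      PySem.List.pyGetD_zero_cons a rest 0
    rw [h0]
    have := aLoop_eq_bScan (a :: rest) rest 1 rfl (le_refl 1) ([] ++ [a]) a
      (PySem.List.pyGetD_neg_one_append_singleton [] a 0)
    simpa using this
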